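-- pv_equiv track=rewrite | github.com/hjyhjony-glitch/xuelema | persistent_memory/tagger.py | _get_mutually_exclusive
-- ===== SOURCE A (Python) =====
-- from typing import Any, Dict, List, Optional, Set, Tuple
--
-- def _get_mutually_exclusive(tag: str) -> Set[str]:
--     """
--     获取互斥标签集合
--
--     Args:
--         tag: 标签名
--
--     Returns:
--         Set[str]: 互斥标签集合
--     """
--     exclusive_groups = [
--         {"high_priority", "medium_priority", "low_priority"},
--         {"important", "low_priority"},
--         {"in_progress", "completed", "blocked"},
--         {"task", "question", "discussion", "announcement"},
--     ]
--
--     for group in exclusive_groups: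
--         if tag in group:
--             return group - {tag}
--
--     return set()
-- ===== SOURCE B (Python) =====
-- # B: precompute a tag -> exclusive-set table once at module scope (first group
-- # wins for duplicated tags); the function is a single dict lookup + copy.
-- _EXCLUSIVE_GROUPS = [
--     {"high_priority", "medium_priority", "low_priority"},
--     {"important", "low_priority"},
--     {"in_progress", "completed", "blocked"},
--     {"task", "question", "discussion", "announcement"},
-- ]
--
-- _EXCLUSIVE_MAP = {}
-- for _group in _EXCLUSIVE_GROUPS:
--     for _t in _group:
--         _EXCLUSIVE_MAP.setdefault(_t, _group - {_t})
--
--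
-- def _get_mutually_exclusive(tag: str):
--     return set(_EXCLUSIVE_MAP.get(tag, set()))
-- ===== Notes on version B (the rewrite author's own statement) =====
-- stated objective: idiomatic
-- what changed: Replaces the per-call scan over the four exclusivity groups with a module-level dict precomputed once via setdefault (first group wins for the duplicated 'low_priority'); the function becomes a single table lookup returning a fresh copy of the stored set.
import Mathlib
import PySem

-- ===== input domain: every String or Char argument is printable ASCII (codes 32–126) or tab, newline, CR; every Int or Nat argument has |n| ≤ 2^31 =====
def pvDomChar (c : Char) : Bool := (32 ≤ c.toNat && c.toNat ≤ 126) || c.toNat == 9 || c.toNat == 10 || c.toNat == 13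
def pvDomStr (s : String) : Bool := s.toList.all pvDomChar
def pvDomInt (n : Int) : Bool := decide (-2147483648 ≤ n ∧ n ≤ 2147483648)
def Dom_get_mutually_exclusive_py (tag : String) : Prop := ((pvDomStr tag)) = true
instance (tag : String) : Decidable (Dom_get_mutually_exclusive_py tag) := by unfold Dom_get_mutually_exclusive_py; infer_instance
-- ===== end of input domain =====

-- B replaces A's per-call scan over the four exclusivity groups with a
-- precomputed tag → exclusive-set table built once (idiomatic; return value only).

-- ===== PORT A =====
-- A's local list of exclusive groups (sets, in written order)
def pvGroupsA : List (PySem.Set String) :=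
  [ PySem.Set.ofList ["high_priority", "medium_priority", "low_priority"],
    PySem.Set.ofList ["important", "low_priority"],
    PySem.Set.ofList ["in_progress", "completed", "blocked"],
    PySem.Set.ofList ["task", "question", "discussion", "announcement"] ]

-- 'for group in exclusive_groups: if tag in group: return group - {tag}; return set()'
def get_mutually_exclusive_py (tag : String) : List String :=
  match pvGroupsA.find? (fun g => PySem.Set.contains g tag) with
  | some g => PySem.Set.diff g [tag]
  | none => PySem.Set.empty

-- ===== PORT B =====
def pvGroupsB : List (PySem.Set String) :=
  [ PySem.Set.ofList ["high_priority", "medium_priority", "low_priority"],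
    PySem.Set.ofList ["important", "low_priority"],
    PySem.Set.ofList ["in_progress", "completed", "blocked"],
    PySem.Set.ofList ["task", "question", "discussion", "announcement"] ]

-- module-level table: for each group, for each tag, setdefault(tag, group - {tag})
def pvExclusiveMap : PySem.Dict String (PySem.Set String) :=
  pvGroupsB.foldl
    (fun d g => g.foldl (fun d t => PySem.Dict.setdefault d t (PySem.Set.diff g [t])) d)
    PySem.Dict.empty

-- 'return set(_EXCLUSIVE_MAP.get(tag, set()))'
def get_mutually_exclusive_py_alt (tag : String) : List String :=
  PySem.Set.ofList (PySem.Dict.getD pvExclusiveMap tag PySem.Set.empty)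

-- ===== PRECONDITION & SPEC =====
def Spec_get_mutually_exclusive_py (tag : String) (out : List String) : Prop := out = get_mutually_exclusive_py_alt tag
instance (tag : String) (out : List String) : Decidable (Spec_get_mutually_exclusive_py tag out) := by unfold Spec_get_mutually_exclusive_py; infer_instance

-- ===== CLAIM (what is proved, stated in full; the proofs are below) =====
def Claim_equal_get_mutually_exclusive_py : Prop := ∀ (tag : String), Dom_get_mutually_exclusive_py tag → Spec_get_mutually_exclusive_py tag (get_mutually_exclusive_py tag)

-- ===== LEMMAS AND PROOFS =====

-- ===== VERDICT (by name: the statement is the Claim_ definition above) =====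
theorem get_mutually_exclusive_py_spec : Claim_equal_get_mutually_exclusive_py := by
  intro tag _
  unfold Spec_get_mutually_exclusive_py
  by_cases h1 : tag = "high_priority"; · subst h1; decide
  by_cases h2 : tag = "medium_priority"; · subst h2; decide
  by_cases h3 : tag = "low_priority"; · subst h3; decide
  by_cases h4 : tag = "important"; · subst h4; decide
  by_cases h5 : tag = "in_progress"; · subst h5; decide
  by_cases h6 : tag = "completed"; · subst h6; decide
  by_cases h7 : tag = "blocked"; · subst h7; decide
  by_cases h8 : tag = "task"; · subst h8; decide
  by_cases h9 : tag = "question"; · subst h9; decide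
  by_cases h10 : tag = "discussion"; · subst h10; decide
  by_cases h11 : tag = "announcement"; · subst h11; decide
  have g1 : ("high_priority" == tag) = false := by simp [Ne.symm h1]
  have g2 : ("medium_priority" == tag) = false := by simp [Ne.symm h2]
  have g3 : ("low_priority" == tag) = false := by simp [Ne.symm h3]
  have g4 : ("important" == tag) = false := by simp [Ne.symm h4]
  have g5 : ("in_progress" == tag) = false := by simp [Ne.symm h5]
  have g6 : ("completed" == tag) = false := by simp [Ne.symm h6]
  have g7 : ("blocked" == tag) = false := by simp [Ne.symm h7]
  have g8 : ("task" == tag) = false := by simp [Ne.symm h8]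
  have g9 : ("question" == tag) = false := by simp [Ne.symm h9]
  have g10 : ("discussion" == tag) = false := by simp [Ne.symm h10]
  have g11 : ("announcement" == tag) = false := by simp [Ne.symm h11]
  simp [get_mutually_exclusive_py, get_mutually_exclusive_py_alt, pvGroupsA, pvExclusiveMap,
        pvGroupsB, PySem.Set.ofList, PySem.Set.add, PySem.Set.contains, PySem.Set.empty,
        PySem.Dict.setdefault, PySem.Dict.getD, PySem.Dict.get?, PySem.Dict.empty,
        PySem.Dict.contains, List.find?,
        h1, h2, h3, h4, h5, h6, h7, h8, h9, h10, h11, g1, g2, g3, g4, g5, g6, g7, g8, g9, g10, g11]
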